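-- pv_equiv track=rewrite | github.com/superqwe/Bollettino35 | util_00.py | direzione_dominante
-- ===== SOURCE A (Python) =====
-- def direzione_dominante(direzioni):
--     punti_cardinali = ('N', 'NE', 'E', 'SE', 'S', 'SO', 'O', 'NO')
--     ddirezioni = {}
--
--     for d in punti_cardinali:
--         ddirezioni[d] = direzioni.count(d)
--
--     dominante = [(ddirezioni[x], x) for x in ddirezioni]
--     dominante.sort(reverse=True)
--
--     if dominante[0][0] == dominante[1][0]:
--         dominante = 'V'
--     else:
--         dominante = dominante[0][1]
--
--     return dominante
-- ===== SOURCE B (Python) =====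
-- def direzione_dominante(direzioni):
--     punti_cardinali = ('N', 'NE', 'E', 'SE', 'S', 'SO', 'O', 'NO')
--     conteggi = [direzioni.count(d) for d in punti_cardinali]
--     m = max(conteggi)
--     if conteggi.count(m) > 1:
--         return 'V'
--     return punti_cardinali[conteggi.index(m)]
-- ===== Notes on version B (the rewrite author's own statement) =====
-- stated objective: simpler
-- what changed: B drops the dict of (count,name) pairs and the reverse tuple-sort with its tie-break machinery: it computes the eight counts, takes their max, and returns 'V' when the max is attained more than once, otherwise the direction at the index of the unique max.
import Mathlib
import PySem

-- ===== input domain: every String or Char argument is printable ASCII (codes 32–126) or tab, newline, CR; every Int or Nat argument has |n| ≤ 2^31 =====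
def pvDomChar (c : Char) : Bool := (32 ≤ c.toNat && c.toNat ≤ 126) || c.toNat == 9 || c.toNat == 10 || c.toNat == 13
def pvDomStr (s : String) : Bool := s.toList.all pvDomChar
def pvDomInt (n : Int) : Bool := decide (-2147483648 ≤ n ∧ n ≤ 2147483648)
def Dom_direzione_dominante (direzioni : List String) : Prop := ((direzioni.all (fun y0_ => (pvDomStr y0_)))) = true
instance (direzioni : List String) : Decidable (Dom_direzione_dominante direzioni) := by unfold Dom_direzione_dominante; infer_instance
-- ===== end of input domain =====

-- B replaces A's dict of (count,name) pairs and reverse tuple-sort by a max-and-multiplicity scan over the eight counts (simpler, no sort).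

-- ===== PORT A =====
def direzione_dominante (direzioni : List String) : String :=
  let punti_cardinali : List String := ["N", "NE", "E", "SE", "S", "SO", "O", "NO"]
  let ddirezioni : PySem.Dict String Int :=
    punti_cardinali.foldl (fun d x => d.insert x ((PySem.List.count direzioni x : Nat) : Int)) PySem.Dict.empty
  let dominante : List (Int × String) := ddirezioni.keys.map (fun x => (ddirezioni.getD x 0, x))
  let dominante := PySem.List.sorted2 dominante Prod.fst Prod.snd true
  -- dominante[0] / dominante[1]: the list always has 8 elements, so the indexing never raises
  match PySem.List.pyGet? dominante 0, PySem.List.pyGet? dominante 1 with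
  | some p0, some p1 => if p0.1 == p1.1 then "V" else p0.2
  | _, _ => ""

-- ===== PORT B =====
def direzione_dominante_alt (direzioni : List String) : String :=
  let punti_cardinali : List String := ["N", "NE", "E", "SE", "S", "SO", "O", "NO"]
  let conteggi : List Int := punti_cardinali.map (fun d => ((PySem.List.count direzioni d : Nat) : Int))
  -- max(conteggi): conteggi always has 8 elements, so max? is always some
  match PySem.List.max? conteggi (fun x => x) with
  | none => ""
  | some m =>
    if PySem.List.count conteggi m > 1 then "V"
    else
      match PySem.List.index? conteggi m with
      | some i => (PySem.List.pyGet? punti_cardinali (i : Int)).getD ""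
      | none => ""

-- ===== PRECONDITION & SPEC =====
def Spec_direzione_dominante (direzioni : List String) (out : String) : Prop := out = direzione_dominante_alt direzioni
instance (direzioni : List String) (out : String) : Decidable (Spec_direzione_dominante direzioni out) := by unfold Spec_direzione_dominante; infer_instance

-- ===== CLAIM (what is proved, stated in full; the proofs are below) =====
def Claim_equal_direzione_dominante : Prop := ∀ (direzioni : List String), Dom_direzione_dominante direzioni → Spec_direzione_dominante direzioni (direzione_dominante direzioni)

-- ===== LEMMAS AND PROOFS =====

theorem sorted2_eq_sorted_lex (L : List (Int × String)) :
    PySem.List.sorted2 L Prod.fst Prod.snd true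
      = PySem.List.sorted L (fun p => toLex p) true := by
  have h1 : PySem.List.sorted2 L Prod.fst Prod.snd true
      = List.foldl (fun acc x => PySem.List.insertBy
          (fun a b => decide (b.1 < a.1) || (!decide (a.1 < b.1) && decide (b.2 < a.2))) x acc) [] L := rfl
  have h2 : PySem.List.sorted L (fun p => toLex p) true
      = List.foldl (fun acc x => PySem.List.insertBy
          (fun a b => decide ((toLex b : Lex (Int × String)) < toLex a)) x acc) [] L := rfl
  rw [h1, h2]
  congr 1
  funext acc x
  congr 1
  funext a b
  rcases lt_trichotomy a.1 b.1 with h | h | h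
  · simp [Prod.Lex.lt_iff, h, lt_asymm h, (ne_of_lt h).symm]
  · simp [Prod.Lex.lt_iff, h]
  · simp [Prod.Lex.lt_iff, h]

theorem lex_fst_le {a b : Int × String} (h : (toLex b : Lex (Int × String)) ≤ toLex a) : b.1 ≤ a.1 := by
  rcases Prod.Lex.le_iff.mp h with h1 | ⟨h1, _⟩
  · exact le_of_lt h1
  · exact le_of_eq h1

theorem eq_of_countP_eq_one {α : Type} [DecidableEq α] {l : List α} {q : α → Bool}
    (h1 : l.countP q = 1) {x y : α}
    (hx : x ∈ l) (hy : y ∈ l) (hqx : q x = true) (hqy : q y = true) : x = y := by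
  have hx' : x ∈ l.filter q := List.mem_filter.mpr ⟨hx, hqx⟩
  have hy' : y ∈ l.filter q := List.mem_filter.mpr ⟨hy, hqy⟩
  have hlen : (l.filter q).length = 1 := by simpa [List.countP_eq_length_filter] using h1
  obtain ⟨z, hz⟩ := List.length_eq_one_iff.mp hlen
  rw [hz] at hx' hy'
  simp at hx' hy'; subst hx'; exact hy'.symm

theorem core_eq (pts : List String) (f : String → Int)
    (hlen : 2 ≤ pts.length) :
    (match PySem.List.pyGet? (PySem.List.sorted2 (pts.map (fun x => (f x, x))) Prod.fst Prod.snd true) 0,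
           PySem.List.pyGet? (PySem.List.sorted2 (pts.map (fun x => (f x, x))) Prod.fst Prod.snd true) 1 with
     | some p0, some p1 => if p0.1 == p1.1 then "V" else p0.2
     | _, _ => "")
    =
    (match PySem.List.max? (pts.map f) (fun x => x) with
     | none => ""
     | some m =>
       if PySem.List.count (pts.map f) m > 1 then "V"
       else
         match PySem.List.index? (pts.map f) m with
         | some i => (PySem.List.pyGet? pts (i : Int)).getD ""
         | none => "") := by
  rw [sorted2_eq_sorted_lex]
  set L : List (Int × String) := pts.map (fun x => (f x, x)) with hL
  set key : Int × String → Lex (Int × String) := fun p => toLex p with hkey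
  set cs : List Int := pts.map f with hcs
  set s := PySem.List.sorted L key true with hs
  have hperm : s.Perm L := hs ▸ PySem.List.sorted_perm L key true
  have hpair : List.Pairwise (fun a b => key b ≤ key a) s := hs ▸ PySem.List.sorted_pairwise_rev L key
  have hheadge : ∀ {m t}, s = m :: t → ∀ y ∈ L, key y ≤ key m := fun h =>
    PySem.List.key_head_sorted_rev_ge L key (hs ▸ h)
  clear_value s
  have hslen : s.length = pts.length := by rw [hperm.length_eq, hL, List.length_map]
  obtain ⟨p0, p1, r, hst⟩ : ∃ p0 p1 r, s = p0 :: p1 :: r := by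
    rcases s with _ | ⟨p0, _ | ⟨p1, r⟩⟩
    · simp at hslen; omega
    · simp at hslen; omega
    · exact ⟨p0, p1, r, rfl⟩
  subst hst
  have hmaxlex : ∀ y ∈ L, key y ≤ key p0 := hheadge rfl
  have hp0L : p0 ∈ L := hperm.subset List.mem_cons_self
  have hfst : ∀ y ∈ L, y.1 ≤ p0.1 := fun y hy => lex_fst_le (hmaxlex y hy)
  have hcsL : cs = L.map Prod.fst := by rw [hL, hcs, List.map_map]; rfl
  have hmem_cs : p0.1 ∈ cs := by rw [hcsL]; exact List.mem_map_of_mem hp0L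
  have hmax_cs : ∀ v ∈ cs, v ≤ p0.1 := by
    intro v hv
    rw [hcsL] at hv
    obtain ⟨y, hy, rfl⟩ := List.mem_map.mp hv
    exact hfst y hy
  have hcs_ne : cs ≠ [] := by
    intro h
    rw [hcs, List.map_eq_nil_iff] at h
    rw [h] at hlen; simp at hlen
  obtain ⟨m, hm⟩ : ∃ m, PySem.List.max? cs (fun x => x) = some m := by
    cases hmc : PySem.List.max? cs (fun x => x) with
    | none => exact absurd ((PySem.List.max?_eq_none_iff cs _).mp hmc) hcs_ne
    | some m => exact ⟨m, rfl⟩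
  have hmM : m = p0.1 := le_antisymm (hmax_cs m (PySem.List.max?_mem hm))
    (PySem.List.max?_isMax hm p0.1 hmem_cs)
  subst hmM
  set P : Int × String → Bool := fun p => p.1 == p0.1 with hP
  have hPp0 : P p0 = true := by simp [hP]
  have hcount : PySem.List.count cs p0.1 = L.countP P := by
    rw [PySem.List.count_eq, List.count, hcsL, List.countP_map]; rfl
  have hcountS : L.countP P = (p0 :: p1 :: r).countP P := (hperm.countP_eq P).symm
  have hsplit : (p0 :: p1 :: r).countP P = (p1 :: r).countP P + 1 := by
    rw [List.countP_cons, hPp0]; simp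
  have hp1le : key p1 ≤ key p0 := (List.pairwise_cons.mp hpair).1 p1 List.mem_cons_self
  have hget0 : PySem.List.pyGet? (p0 :: p1 :: r) 0 = some p0 := by
    rw [show (0 : Int) = ((0 : Nat) : Int) from rfl, PySem.List.pyGet?_natCast]; simp
  have hget1 : PySem.List.pyGet? (p0 :: p1 :: r) 1 = some p1 := by
    rw [show (1 : Int) = ((1 : Nat) : Int) from rfl, PySem.List.pyGet?_natCast]; simp
  rw [hget0, hget1, hm]
  show (if p0.1 == p1.1 then "V" else p0.2)
      = (if PySem.List.count cs p0.1 > 1 then "V"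
         else match PySem.List.index? cs p0.1 with
              | some i => (PySem.List.pyGet? pts (i : Int)).getD ""
              | none => "")
  by_cases htie : 2 ≤ L.countP P
  · -- at least two maximal entries: both sides give "V"
    have hp1M : p1.1 = p0.1 := by
      by_cases hPp1 : P p1 = true
      · simpa [hP] using hPp1
      · exfalso
        have h2 : 2 ≤ (p1 :: r).countP P + 1 := by rw [← hsplit, ← hcountS]; exact htie
        rw [List.countP_cons] at h2
        have hPf : P p1 = false := eq_false_of_ne_true hPp1
        rw [hPf] at h2
        simp only [Bool.false_eq_true, if_false, Nat.add_zero] at h2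
        obtain ⟨z, hz, hPz⟩ := List.countP_pos_iff.mp (by omega : 0 < r.countP P)
        have hzM : z.1 = p0.1 := by simpa [hP] using hPz
        have h1 : z.1 ≤ p1.1 := lex_fst_le ((List.pairwise_cons.mp (List.pairwise_cons.mp hpair).2).1 z hz)
        have h2' : p1.1 ≤ p0.1 := lex_fst_le hp1le
        exact hPp1 (by simp [hP]; omega)
    have hgt : PySem.List.count cs p0.1 > 1 := by rw [hcount]; omega
    rw [if_pos (show (p0.1 == p1.1) = true by simp [hp1M]), if_pos hgt]
  · -- unique maximum
    have h1le : 1 ≤ L.countP P := by rw [hcountS, hsplit]; omega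
    have hone : L.countP P = 1 := by omega
    have hcnt1 : PySem.List.count cs p0.1 = 1 := by rw [hcount, hone]
    have hPp1 : P p1 = false := by
      have h2 : (p1 :: r).countP P + 1 = 1 := by rw [← hsplit, ← hcountS]; exact hone
      rw [List.countP_cons] at h2
      by_contra hc
      simp at hc
      rw [hc] at h2; simp at h2
    have hPp1' : p1.1 ≠ p0.1 := by rw [hP] at hPp1; simpa using hPp1
    have hne : ¬ ((p0.1 == p1.1) = true) := by
      simp only [beq_iff_eq]
      exact fun h => hPp1' h.symm
    obtain ⟨i, hi⟩ : ∃ i, PySem.List.index? cs p0.1 = some i := by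
      have hsome := List.isSome_idxOf?.mpr hmem_cs
      unfold PySem.List.index?
      cases h : List.idxOf? p0.1 cs with
      | none => rw [h] at hsome; simp at hsome
      | some i => exact ⟨i, rfl⟩
    have hi' : List.idxOf? p0.1 cs = some i := hi
    obtain ⟨hiL, hcsi, -⟩ := List.idxOf?_eq_some_iff.mp hi'
    have hiL' : i < pts.length := by rw [hcs] at hiL; simpa using hiL
    have hgetp : PySem.List.pyGet? pts (i : Int) = some (pts[i]'hiL') := by
      rw [PySem.List.pyGet?_natCast]; exact List.getElem?_eq_getElem hiL'
    have hq : cs[i]? = some p0.1 := by rw [List.getElem?_eq_getElem hiL, hcsi]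
    have hfi : f (pts[i]'hiL') = p0.1 := by
      rw [hcs, List.getElem?_map, List.getElem?_eq_getElem hiL'] at hq
      simpa using hq
    obtain ⟨x, hxpts, hx⟩ := List.mem_map.mp hp0L
    have hxf : f x = p0.1 := by rw [← hx]
    have hx2 : p0.2 = x := by rw [← hx]
    have hcountpts : pts.countP (fun y => f y == p0.1) = 1 := by
      rw [← hone, hL, List.countP_map]; rfl
    have hxeq : x = pts[i]'hiL' := eq_of_countP_eq_one hcountpts hxpts (List.getElem_mem hiL')
      (by simp [hxf]) (by simp [hfi])
    have hngt : ¬ (PySem.List.count cs p0.1 > 1) := by rw [hcnt1]; omega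
    rw [if_neg hne, if_neg hngt, hi]
    show p0.2 = (PySem.List.pyGet? pts (i : Int)).getD ""
    rw [hgetp]
    simp [hx2, hxeq]

-- ===== VERDICT (by name: the statement is the Claim_ definition above) =====
set_option maxHeartbeats 2000000 in
theorem direzione_dominante_spec : Claim_equal_direzione_dominante := by
  intro direzioni _
  unfold Spec_direzione_dominante
  have hA : direzione_dominante direzioni =
      (match PySem.List.pyGet? (PySem.List.sorted2 ((["N", "NE", "E", "SE", "S", "SO", "O", "NO"] : List String).map
               (fun x => (((PySem.List.count direzioni x : Nat) : Int), x))) Prod.fst Prod.snd true) 0,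
             PySem.List.pyGet? (PySem.List.sorted2 ((["N", "NE", "E", "SE", "S", "SO", "O", "NO"] : List String).map
               (fun x => (((PySem.List.count direzioni x : Nat) : Int), x))) Prod.fst Prod.snd true) 1 with
       | some p0, some p1 => if p0.1 == p1.1 then "V" else p0.2
       | _, _ => "") := by
    unfold direzione_dominante
    simp [List.foldl, List.map, PySem.Dict.insert, PySem.Dict.empty, PySem.Dict.keys,
      PySem.Dict.getD, PySem.Dict.get?, PySem.Dict.contains, List.any, List.find?]
  have hB : direzione_dominante_alt direzioni =
      (match PySem.List.max? ((["N", "NE", "E", "SE", "S", "SO", "O", "NO"] : List String).map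
               (fun d => ((PySem.List.count direzioni d : Nat) : Int))) (fun x => x) with
       | none => ""
       | some m =>
         if PySem.List.count ((["N", "NE", "E", "SE", "S", "SO", "O", "NO"] : List String).map
               (fun d => ((PySem.List.count direzioni d : Nat) : Int))) m > 1 then "V"
         else
           match PySem.List.index? ((["N", "NE", "E", "SE", "S", "SO", "O", "NO"] : List String).map
               (fun d => ((PySem.List.count direzioni d : Nat) : Int))) m with
           | some i => (PySem.List.pyGet? (["N", "NE", "E", "SE", "S", "SO", "O", "NO"] : List String) (i : Int)).getD ""
           | none => "") := rfl
  rw [hA, hB]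
  exact core_eq (["N", "NE", "E", "SE", "S", "SO", "O", "NO"] : List String)
    (fun d => ((PySem.List.count direzioni d : Nat) : Int)) (by decide)
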